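-- pv_equiv track=rewrite | github.com/DivyansghDMK/qww_new | src/utils/ecg_payload_builder.py | _device_data_string
-- ===== SOURCE A (Python) =====
-- from typing import Any, Dict, List, Optional
--
-- LEAD_NAMES: List[str] = ["I", "II", "III", "aVR", "aVL", "aVF", "V1", "V2", "V3", "V4", "V5", "V6"]
--
-- def _device_data_string(leads: Dict[str, List[int]]) -> str:
--     """Build pipe-separated device data string as frame-wise [12 values] chunks."""
--     try:
--         # Required compact format:
--         #   [I0,II0,III0,aVR0,aVL0,aVF0,V10,V20,V30,V40,V50,V60]|
--         #   [I1,II1,III1,...]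
--         # One frame per sample, each frame has 12 lead values.
--         frames = []
--         n = 0
--         for name in LEAD_NAMES:
--             n = max(n, len(leads.get(name, [])))
--         for s_idx in range(n):
--             vals = []
--             for name in LEAD_NAMES:
--                 arr = leads.get(name, [])
--                 v = arr[s_idx] if s_idx < len(arr) else 0
--                 vals.append(str(int(round(v))))
--             frames.append("[" + ",".join(vals) + "]")
--         return "|".join(frames)
--     except Exception:
--         return ""
-- ===== SOURCE B (Python) =====
-- from typing import Dict, List
--
-- LEAD_NAMES: List[str] = ["I", "II", "III", "aVR", "aVL", "aVF", "V1", "V2", "V3", "V4", "V5", "V6"]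
--
-- def _device_data_string(leads: Dict[str, List[int]]) -> str:
--     """Build pipe-separated device data string by peeling one sample off each lead per frame."""
--     columns = [leads.get(name, []) for name in LEAD_NAMES]
--     frames = []
--     while any(columns):
--         frames.append("[" + ",".join(str(c[0]) if c else "0" for c in columns) + "]")
--         columns = [c[1:] for c in columns]
--     return "|".join(frames)
-- ===== Notes on version B (the rewrite author's own statement) =====
-- stated objective: alternative
-- what changed: B replaces A's precomputed max-length + index-with-bounds-check inner loop by a column-peeling transpose: build the 12 lead lists once, then repeatedly emit a frame from the current heads (0 for exhausted leads) and drop the heads until all columns are empty.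
import Mathlib
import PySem

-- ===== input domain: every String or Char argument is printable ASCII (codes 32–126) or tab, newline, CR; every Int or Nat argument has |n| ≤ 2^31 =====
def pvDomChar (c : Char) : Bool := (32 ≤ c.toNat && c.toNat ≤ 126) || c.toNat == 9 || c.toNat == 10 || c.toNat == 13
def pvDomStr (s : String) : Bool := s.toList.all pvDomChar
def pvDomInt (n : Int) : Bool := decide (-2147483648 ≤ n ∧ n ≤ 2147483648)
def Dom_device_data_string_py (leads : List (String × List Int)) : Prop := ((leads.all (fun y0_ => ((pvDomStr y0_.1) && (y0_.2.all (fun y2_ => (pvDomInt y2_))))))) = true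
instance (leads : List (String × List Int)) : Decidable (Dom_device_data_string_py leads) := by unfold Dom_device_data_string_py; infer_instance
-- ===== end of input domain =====

-- B builds the 12 lead columns once and peels one head per frame instead of indexing with a
-- bounds check up to a precomputed max length; return values are identical.

def LEAD_NAMES : List String :=
  ["I", "II", "III", "aVR", "aVL", "aVF", "V1", "V2", "V3", "V4", "V5", "V6"]

-- ===== PORT A =====
-- n = max over LEAD_NAMES of len(leads.get(name, [])); for s_idx in range(n): frame from
-- arr[s_idx] if in range else 0.  round(int)=int, so str(int(round(v))) = PySem.Int.toStr v.
-- The try/except is dead on well-typed input (nothing inside can raise) and is omitted.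
def device_data_string_py (leads : List (String × List Int)) : String :=
  let d := PySem.Dict.mk leads
  let n : Nat := LEAD_NAMES.foldl (fun n name => max n (PySem.Dict.getD d name []).length) 0
  let frames := (List.range n).map (fun s_idx =>
    let vals := LEAD_NAMES.map (fun name =>
      let arr := PySem.Dict.getD d name []
      let v : Int := if s_idx < arr.length then arr.getD s_idx 0 else 0
      PySem.Int.toStr v)
    "[" ++ String.intercalate "," vals ++ "]")
  String.intercalate "|" frames

-- ===== PORT B =====
-- termination helpers for the while loop (cited by pvPeelFrames's decreasing_by)
lemma pvTailSum_le (cs : List (List Int)) :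
    ((cs.map List.tail).map List.length).sum ≤ (cs.map List.length).sum := by
  induction cs with
  | nil => simp
  | cons c cs ih =>
    simp only [List.map_cons, List.sum_cons]
    have : c.tail.length ≤ c.length := by cases c <;> simp
    omega

lemma pvTailSum_lt (cs : List (List Int)) (h : cs.any (fun c => !c.isEmpty) = true) :
    ((cs.map List.tail).map List.length).sum < (cs.map List.length).sum := by
  induction cs with
  | nil => simp at h
  | cons c cs ih =>
    simp only [List.any_cons, Bool.or_eq_true] at h
    simp only [List.map_cons, List.sum_cons]
    rcases h with h | h
    · have hne : c ≠ [] := by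
        simpa [Bool.not_eq_true', List.isEmpty_eq_false_iff] using h
      have h1 : c.tail.length < c.length := by
        cases c with
        | nil => exact absurd rfl hne
        | cons a t => simp
      have h2 := pvTailSum_le cs
      omega
    · have h1 : c.tail.length ≤ c.length := by cases c <;> simp
      have h2 := ih h
      omega

-- while any(columns): emit frame from heads (or "0"), replace columns by their tails.
def pvPeelFrames (columns : List (List Int)) : List String :=
  if h : columns.any (fun c => !c.isEmpty) then
    ("[" ++ String.intercalate ","
        (columns.map (fun c => match c with
          | [] => "0"
          | x :: _ => PySem.Int.toStr x)) ++ "]")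
      :: pvPeelFrames (columns.map List.tail)
  else []
termination_by (columns.map List.length).sum
decreasing_by simpa using pvTailSum_lt columns h

def device_data_string_py_alt (leads : List (String × List Int)) : String :=
  let d := PySem.Dict.mk leads
  let columns := LEAD_NAMES.map (fun name => PySem.Dict.getD d name [])
  String.intercalate "|" (pvPeelFrames columns)

-- ===== PRECONDITION & SPEC =====
def Spec_device_data_string_py (leads : List (String × List Int)) (out : String) : Prop := out = device_data_string_py_alt leads
instance (leads : List (String × List Int)) (out : String) : Decidable (Spec_device_data_string_py leads out) := by unfold Spec_device_data_string_py; infer_instance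

-- ===== CLAIM (what is proved, stated in full; the proofs are below) =====
def Claim_equal_device_data_string_py : Prop := ∀ (leads : List (String × List Int)), Dom_device_data_string_py leads → Spec_device_data_string_py leads (device_data_string_py leads)

-- ===== LEMMAS AND PROOFS =====

def pvMaxLen (columns : List (List Int)) : Nat :=
  columns.foldl (fun n c => max n c.length) 0

def pvFrameAt (columns : List (List Int)) (i : Nat) : String :=
  "[" ++ String.intercalate ","
    (columns.map (fun c => PySem.Int.toStr (if i < c.length then c.getD i 0 else 0))) ++ "]"

lemma pvMaxLen_foldl (columns : List (List Int)) (init : Nat) :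
    columns.foldl (fun n c => max n c.length) init = max init (pvMaxLen columns) := by
  induction columns generalizing init with
  | nil => simp [pvMaxLen]
  | cons c cs ih =>
    simp only [pvMaxLen, List.foldl_cons] at *
    rw [ih (max init c.length), ih (max 0 c.length)]
    omega

lemma pvMaxLen_cons (c : List Int) (cs : List (List Int)) :
    pvMaxLen (c :: cs) = max c.length (pvMaxLen cs) := by
  simp only [pvMaxLen, List.foldl_cons]
  rw [pvMaxLen_foldl]
  simp only [pvMaxLen]
  omega

lemma pvMaxLen_tails (columns : List (List Int)) :
    pvMaxLen (columns.map List.tail) = pvMaxLen columns - 1 := by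
  induction columns with
  | nil => simp [pvMaxLen]
  | cons c cs ih =>
    rw [List.map_cons, pvMaxLen_cons, pvMaxLen_cons, ih, List.length_tail]
    omega

lemma pvMaxLen_pos_iff (columns : List (List Int)) :
    (columns.any (fun c => !c.isEmpty)) = true ↔ 0 < pvMaxLen columns := by
  induction columns with
  | nil => simp [pvMaxLen]
  | cons c cs ih =>
    rw [pvMaxLen_cons]
    simp only [List.any_cons, Bool.or_eq_true, ih, Bool.not_eq_true', List.isEmpty_eq_false_iff]
    constructor
    · rintro (h | h)
      · have := List.length_pos_of_ne_nil h
        omega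
      · omega
    · intro h
      rcases Nat.lt_or_ge 0 (pvMaxLen cs) with h' | h'
      · exact Or.inr h'
      · left
        intro hnil
        rw [hnil] at h
        simp only [List.length_nil] at h
        omega

lemma pvFrameAt_succ (columns : List (List Int)) (i : Nat) :
    pvFrameAt columns (i + 1) = pvFrameAt (columns.map List.tail) i := by
  have hmap : columns.map (fun c => PySem.Int.toStr (if i + 1 < c.length then c.getD (i + 1) 0 else 0))
      = columns.map ((fun c => PySem.Int.toStr (if i < c.length then c.getD i 0 else 0)) ∘ List.tail) := by
    apply List.map_congr_left
    intro c _
    cases c with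
    | nil => simp
    | cons a t =>
      simp only [Function.comp_apply, List.tail_cons, List.length_cons, List.getD_cons_succ]
      congr 1
      by_cases h : i < t.length
      · simp [h, Nat.succ_lt_succ h]
      · simp [h]
  simp only [pvFrameAt, List.map_map, hmap]

lemma pvFrameAt_zero (columns : List (List Int)) :
    pvFrameAt columns 0 =
      "[" ++ String.intercalate ","
        (columns.map (fun c => match c with
          | [] => "0"
          | x :: _ => PySem.Int.toStr x)) ++ "]" := by
  have hmap : columns.map (fun c => PySem.Int.toStr (if 0 < c.length then c.getD 0 0 else 0))
      = columns.map (fun c => match c with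
          | [] => "0"
          | x :: _ => PySem.Int.toStr x) := by
    apply List.map_congr_left
    intro c _
    cases c with
    | nil => rfl
    | cons a t => simp
  simp only [pvFrameAt, hmap]

lemma pvPeelFrames_eq (n : Nat) (columns : List (List Int)) (hn : pvMaxLen columns = n) :
    pvPeelFrames columns = (List.range n).map (pvFrameAt columns) := by
  induction n generalizing columns with
  | zero =>
    unfold pvPeelFrames
    have : ¬ ((columns.any (fun c => !c.isEmpty)) = true) := by
      rw [pvMaxLen_pos_iff, hn]; omega
    simp [this]
  | succ m ih =>
    unfold pvPeelFrames
    have hany : (columns.any (fun c => !c.isEmpty)) = true := by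
      rw [pvMaxLen_pos_iff, hn]; omega
    rw [dif_pos hany]
    have htails : pvMaxLen (columns.map List.tail) = m := by
      rw [pvMaxLen_tails, hn]
      omega
    rw [ih _ htails, List.range_succ_eq_map, List.map_cons, List.map_map]
    congr 1
    · exact (pvFrameAt_zero columns).symm
    · apply List.map_congr_left
      intro i _
      simp only [Function.comp_apply]
      exact (pvFrameAt_succ columns i).symm

lemma device_data_eq (leads : List (String × List Int)) :
    device_data_string_py leads = device_data_string_py_alt leads := by
  unfold device_data_string_py device_data_string_py_alt
  dsimp only
  rw [pvPeelFrames_eq (pvMaxLen (LEAD_NAMES.map (fun name => PySem.Dict.getD (PySem.Dict.mk leads) name []))) _ rfl]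
  have hn : LEAD_NAMES.foldl (fun n name => max n (PySem.Dict.getD (PySem.Dict.mk leads) name []).length) 0
      = pvMaxLen (LEAD_NAMES.map (fun name => PySem.Dict.getD (PySem.Dict.mk leads) name [])) := by
    rw [pvMaxLen, List.foldl_map]
  rw [hn]
  congr 1

-- ===== VERDICT (by name: the statement is the Claim_ definition above) =====
theorem device_data_string_py_spec : Claim_equal_device_data_string_py := by
  intro leads _
  unfold Spec_device_data_string_py
  exact device_data_eq leads
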